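-- pv_equiv track=rewrite | github.com/nnnlife/trader | clients/six_candle/trendline.py | is_support_up_trend
-- ===== SOURCE A (Python) =====
-- def is_support_up_trend(points):
--     low_prices = []
--     prev_price = 0
--
--     for p in points:
--         if p[1] == prev_price:
--             continue
--         low_prices.append(p[1])
--         prev_price = p[1]
--
--     if len(low_prices) >= 2:
--         prev_price = 0
--         for l in low_prices:
--             if l < prev_price:
--                 return False
--             prev_price = l
--         return True
--     return False
-- ===== SOURCE B (Python) =====
-- def is_support_up_trend(points):
--     low_prices = []
--     for p in points:
--         if not low_prices or p[1] != low_prices[-1]: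
--             low_prices.append(p[1])
--     return len(low_prices) >= 2 and low_prices == sorted(low_prices)
-- ===== Notes on version B (the rewrite author's own statement) =====
-- stated objective: idiomatic
-- what changed: The dedup pass keys off low_prices[-1] with no sentinel prev variable, and the hand-rolled early-return monotonicity scan is replaced by a single sorted-comparison (low_prices == sorted(low_prices)).
-- intended difference: On inputs whose consecutive-deduplicated lows are non-decreasing but start with a negative price, or are exactly [0, x] with x > 0, A returns False because it seeds both of its passes with the sentinel prev_price = 0 (dropping a leading 0 and rejecting any negative start), while B returns True, the intended non-decreasing verdict. — e.g. on is_support_up_trend([(0, -1), (1, 2)]): A returns false, B returns true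
import Mathlib
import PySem

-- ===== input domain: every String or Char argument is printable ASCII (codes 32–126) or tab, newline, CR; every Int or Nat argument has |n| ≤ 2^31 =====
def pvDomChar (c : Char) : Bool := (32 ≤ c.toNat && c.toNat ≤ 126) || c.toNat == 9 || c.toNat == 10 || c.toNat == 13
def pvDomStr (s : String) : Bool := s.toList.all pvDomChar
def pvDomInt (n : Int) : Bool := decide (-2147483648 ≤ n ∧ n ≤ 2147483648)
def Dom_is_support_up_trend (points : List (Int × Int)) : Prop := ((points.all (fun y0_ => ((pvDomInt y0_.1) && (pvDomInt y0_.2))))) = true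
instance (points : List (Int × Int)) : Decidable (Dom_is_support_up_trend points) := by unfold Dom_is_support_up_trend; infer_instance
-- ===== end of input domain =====

-- B drops A's sentinel prev_price = 0 and replaces the hand-rolled early-return
-- monotonicity scan with an idiomatic sorted-comparison; on D_ (negative-start or
-- [0,x] deduplicated lows) A's sentinel makes it return False where B returns True.


-- ===== PORT A =====
-- second loop of A: early-return scan 'if l < prev_price: return False'
def isupCheckA : List Int → Int → Bool
  | [], _ => true
  | l :: ls, prev => if l < prev then false else isupCheckA ls l

def is_support_up_trend (points : List (Int × Int)) : Bool :=
  let st := points.foldl (fun (st : List Int × Int) p =>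
      if p.2 == st.2 then st else (st.1 ++ [p.2], p.2)) ([], 0)
  let low_prices := st.1
  if low_prices.length ≥ 2 then isupCheckA low_prices 0
  else false

-- ===== PORT B =====
def is_support_up_trend_alt (points : List (Int × Int)) : Bool :=
  let low_prices := points.foldl (fun (lows : List Int) p =>
      if lows.isEmpty || p.2 != lows.getLast! then lows ++ [p.2] else lows) []
  decide (low_prices.length ≥ 2) && (low_prices == PySem.List.sorted low_prices (fun x => x) false)

-- ===== PRECONDITION & SPEC =====
-- On inputs whose consecutive-deduplicated lows are non-decreasing but start with a
-- negative price, or are exactly [0, x] with x > 0, A returns False because it seeds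
-- both of its passes with the sentinel prev_price = 0 (dropping a leading 0 and
-- rejecting any negative start), while B returns True, the intended non-decreasing verdict.
def D_is_support_up_trend (points : List (Int × Int)) : Prop :=
  let L := (points.map Prod.snd).destutter (· ≠ ·)
  (L.headI < 0 ∧ 2 ≤ L.length ∧ L.IsChain (· ≤ ·)) ∨
  (L.length = 2 ∧ L.headI = 0 ∧ 0 < L.getLast!)
instance (points : List (Int × Int)) : Decidable (D_is_support_up_trend points) := by unfold D_is_support_up_trend; infer_instance

def Spec_is_support_up_trend (points : List (Int × Int)) (out : Bool) : Prop := ¬ D_is_support_up_trend points → out = is_support_up_trend_alt points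
instance (points : List (Int × Int)) (out : Bool) : Decidable (Spec_is_support_up_trend points out) := by unfold Spec_is_support_up_trend; infer_instance

def pvDiffWitness_is_support_up_trend : (List (Int × Int)) := [(0, -1), (1, 2)]
def pvDiffWitnessOut_is_support_up_trend : Bool × Bool := (false, true)

-- ===== CLAIM (what is proved, stated in full; the proofs are below) =====
def Claim_unchanged_is_support_up_trend : Prop := ∀ (points : List (Int × Int)), Dom_is_support_up_trend points → Spec_is_support_up_trend points (is_support_up_trend points)
def Claim_changed_is_support_up_trend : Prop := Dom_is_support_up_trend (pvDiffWitness_is_support_up_trend) ∧ D_is_support_up_trend (pvDiffWitness_is_support_up_trend) ∧ is_support_up_trend (pvDiffWitness_is_support_up_trend) = pvDiffWitnessOut_is_support_up_trend.1 ∧ is_support_up_trend_alt (pvDiffWitness_is_support_up_trend) = pvDiffWitnessOut_is_support_up_trend.2 ∧ pvDiffWitnessOut_is_support_up_trend.1 ≠ pvDiffWitnessOut_is_support_up_trend.2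
def Claim_exact_is_support_up_trend : Prop := ∀ (points : List (Int × Int)), Dom_is_support_up_trend points → D_is_support_up_trend points → is_support_up_trend points ≠ is_support_up_trend_alt points

-- ===== LEMMAS AND PROOFS =====

-- the spine of a consecutive dedup continued from last-kept value y
def pvDD (y : Int) : List Int → List Int
  | [] => []
  | b :: bs => if b = y then pvDD y bs else b :: pvDD b bs

theorem destutter'_eq_pvDD (xs : List Int) (y : Int) :
    List.destutter' (· ≠ ·) y xs = y :: pvDD y xs := by
  induction xs generalizing y with
  | nil => simp [pvDD]
  | cons b bs ih =>
    by_cases h : b = y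
    · subst h
      simp [List.destutter', pvDD, ih]
    · have h' : y ≠ b := fun he => h he.symm
      simp [List.destutter', pvDD, h, h', ih]

theorem pvDD_head_ne (y : Int) (xs : List Int) (b : Int) (bs : List Int)
    (h : pvDD y xs = b :: bs) : b ≠ y := by
  induction xs generalizing y with
  | nil => simp [pvDD] at h
  | cons c cs ih =>
    by_cases hc : c = y
    · exact ih y (by simpa [pvDD, hc] using h)
    · simp [pvDD, hc] at h
      omega

-- A's first loop computes the dedup spine pvDD, tracking the last appended value
theorem foldA_eq (ps : List (Int × Int)) (acc : List Int) (y : Int) :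
    ps.foldl (fun (st : List Int × Int) p =>
        if p.2 == st.2 then st else (st.1 ++ [p.2], p.2)) (acc, y)
      = (acc ++ pvDD y (ps.map Prod.snd),
         List.getLastD (pvDD y (ps.map Prod.snd)) y) := by
  induction ps generalizing acc y with
  | nil => simp [pvDD, List.getLastD]
  | cons p ps ih =>
    by_cases h : p.2 = y
    · simpa [pvDD, h] using ih acc y
    · have hdd : pvDD y (p.2 :: ps.map Prod.snd) = p.2 :: pvDD p.2 (ps.map Prod.snd) := by
        simp [pvDD, h]
      rw [List.map_cons, List.foldl_cons, hdd, List.getLastD_cons]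
      have hc : (p.2 == (acc, y).2) = false := by simpa using h
      rw [hc]
      simpa [List.append_assoc] using ih (acc ++ [p.2]) p.2

-- B's loop computes the consecutive dedup (destutter) of the lows
theorem foldB_loop (ps : List (Int × Int)) (ys : List Int) (y : Int) :
    ps.foldl (fun (lows : List Int) p =>
        if lows.isEmpty || p.2 != lows.getLast! then lows ++ [p.2] else lows) (ys ++ [y])
      = ys ++ y :: pvDD y (ps.map Prod.snd) := by
  induction ps generalizing ys y with
  | nil => simp [pvDD]
  | cons p ps ih =>
    by_cases h : p.2 = y
    · simpa [pvDD, h, List.getLast!_eq_getLast?_getD] using ih ys y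
    · have := ih (ys ++ [y]) p.2
      simpa [pvDD, h, List.getLast!_eq_getLast?_getD] using this

theorem foldB_eq (points : List (Int × Int)) :
    points.foldl (fun (lows : List Int) p =>
        if lows.isEmpty || p.2 != lows.getLast! then lows ++ [p.2] else lows) []
      = (points.map Prod.snd).destutter (· ≠ ·) := by
  cases points with
  | nil => simp
  | cons p ps =>
    rw [List.map_cons, List.destutter, destutter'_eq_pvDD]
    have h2 := foldB_loop ps [] p.2
    simpa using h2

-- A's early-return scan from prev is chain-monotonicity of prev :: ls
theorem isupCheckA_chain (ls : List Int) (prev : Int) :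
    isupCheckA ls prev = decide ((prev :: ls).IsChain (fun a b : Int => a ≤ b)) := by
  induction ls generalizing prev with
  | nil => simp [isupCheckA]
  | cons l ls ih =>
    by_cases h : l < prev
    · have hnc : ¬ ((prev :: l :: ls).IsChain (fun a b : Int => a ≤ b)) := by
        rw [List.isChain_cons_cons]
        rintro ⟨h1, -⟩
        omega
      simp [isupCheckA, h, hnc]
    · have hle : prev ≤ l := by omega
      simp [isupCheckA, h, ih, List.isChain_cons_cons, hle]

-- B's sorted-comparison is pairwise monotonicity
theorem isup_sorted_self (seq : List Int) :
    (seq == PySem.List.sorted seq (fun x => x) false)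
      = decide (seq.Pairwise (fun a b : Int => a ≤ b)) := by
  by_cases h : seq.Pairwise (fun a b : Int => a ≤ b)
  · have hs : PySem.List.sorted seq (fun x : Int => x) false = seq :=
      PySem.List.sorted_eq_self_of_pairwise seq (fun x : Int => x) (by simpa using h)
    simp [hs, h]
  · have hs : seq ≠ PySem.List.sorted seq (fun x : Int => x) false := by
      intro heq
      exact h (by simpa [← heq] using
        PySem.List.sorted_pairwise (xs := seq) (key := fun x : Int => x))
    simp [h, hs]

-- both results as decided propositions on the deduplicated lows
theorem A_char (points : List (Int × Int)) :
    is_support_up_trend points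
      = decide (2 ≤ (pvDD 0 (points.map Prod.snd)).length ∧
          (0 :: pvDD 0 (points.map Prod.snd)).IsChain (fun a b : Int => a ≤ b)) := by
  simp only [is_support_up_trend, foldA_eq, isupCheckA_chain, List.nil_append]
  by_cases h : 2 ≤ (pvDD 0 (points.map Prod.snd)).length <;> simp [h]

theorem B_char (points : List (Int × Int)) :
    is_support_up_trend_alt points
      = decide (2 ≤ ((points.map Prod.snd).destutter (· ≠ ·)).length ∧
          ((points.map Prod.snd).destutter (· ≠ ·)).IsChain (fun a b : Int => a ≤ b)) := by
  simp only [is_support_up_trend_alt, foldB_eq, isup_sorted_self]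
  by_cases h : 2 ≤ ((points.map Prod.snd).destutter (· ≠ ·)).length <;>
    simp [h, List.isChain_iff_pairwise]

-- the case analysis: A = B exactly outside D_
theorem isup_main (points : List (Int × Int)) :
    (is_support_up_trend points = is_support_up_trend_alt points)
      ↔ ¬ D_is_support_up_trend points := by
  rw [A_char, B_char]
  unfold D_is_support_up_trend
  cases hraw : points.map Prod.snd with
  | nil => simp [pvDD]
  | cons v vs =>
    have hdes : ((v :: vs).destutter (· ≠ ·)) = v :: pvDD v vs := by
      simp [List.destutter, destutter'_eq_pvDD]
    rw [hdes]
    by_cases hv : v = 0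
    · subst hv
      have hA : pvDD 0 (0 :: vs) = pvDD 0 vs := by simp [pvDD]
      rw [hA]
      cases ht : pvDD 0 vs with
      | nil => simp
      | cons x t =>
        have hx0 : x ≠ 0 := pvDD_head_ne 0 vs x t ht
        cases t with
        | nil =>
          have e1 : (decide ((2:ℕ) ≤ ([x] : List Int).length ∧
              ((0 :: [x] : List Int).IsChain (fun a b : Int => a ≤ b)))) = false := by
            simp
          have e2 : (decide ((2:ℕ) ≤ ((0 :: [x]) : List Int).length ∧
              (((0 :: [x]) : List Int).IsChain (fun a b : Int => a ≤ b)))) = decide (0 ≤ x) := by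
            simp [List.isChain_cons_cons]
          rw [e1, e2]
          constructor
          · intro h hD
            rcases hD with ⟨h1, _⟩ | ⟨_, _, h3⟩
            · simp [List.headI] at h1
            · have hx : (0:Int) < x := by
                simpa using h3
              have hx2 := of_decide_eq_false h.symm
              omega
          · intro hD
            have hxpos : ¬ 0 < x := fun hpos => hD (Or.inr
              ⟨by simp, by simp [List.headI], by simpa using hpos⟩)
            have hxle : ¬ (0 ≤ x) := by omega
            simp [hxle]
        | cons y s =>
          constructor
          · intro _ hD
            rcases hD with ⟨h1, _⟩ | ⟨h1, _, _⟩
            · simp [List.headI] at h1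
            · simp at h1
          · intro _
            have hlen : (2:ℕ) ≤ (x :: y :: s).length := by simp
            have hlen' : (2:ℕ) ≤ (0 :: x :: y :: s : List Int).length := by simp
            rw [decide_eq_decide]
            constructor
            · rintro ⟨-, h2⟩; exact ⟨hlen', h2⟩
            · rintro ⟨-, h2⟩; exact ⟨hlen, h2⟩
    · have hA : pvDD 0 (v :: vs) = v :: pvDD v vs := by simp [pvDD, hv]
      rw [hA]
      simp only [List.headI]
      rw [decide_eq_decide]
      constructor
      · intro h hD
        rcases hD with ⟨h1, h2, h3⟩ | ⟨_, h2, _⟩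
        · have hb := h.mpr ⟨h2, h3⟩
          rw [List.isChain_cons_cons] at hb
          omega
        · exact hv h2
      · intro hD
        constructor
        · intro ⟨h1, h2⟩
          rw [List.isChain_cons_cons] at h2
          exact ⟨h1, h2.2⟩
        · intro ⟨h1, h2⟩
          by_cases hneg : v < 0
          · exact absurd (Or.inl ⟨hneg, h1, h2⟩) hD
          · rw [List.isChain_cons_cons]
            exact ⟨h1, by omega, h2⟩

-- ===== VERDICT (by name: the statement is the Claim_ definition above) =====
theorem is_support_up_trend_spec : Claim_unchanged_is_support_up_trend := by
  intro points _ hD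
  exact (isup_main points).mpr hD

theorem is_support_up_trend_changed : Claim_changed_is_support_up_trend := by
  unfold Claim_changed_is_support_up_trend; decide

theorem is_support_up_trend_tight : Claim_exact_is_support_up_trend := by
  intro points _ hD h
  exact (isup_main points).mp h hD
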